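-- pv_equiv track=rewrite | github.com/hans-elliott99/py-bits | advent-of-code/2022/day15.py | draw_grid
-- ===== SOURCE A (Python) =====
-- def draw_grid(not_beacons:list, sensors:dict):
--     """Draw the grid (only feasible for the puzzle's example input)
--     """
--     beacons = sensors.values()
--     xs = set([x for x,_ in not_beacons])
--     ys = set([y for _,y in not_beacons])
--
--     out = ""
--     for row in range(min(ys), max(ys)+1):
--         chars = f"{row :<} "
--         for col in range(min(xs), max(xs)+1):
--             if (col, row) in sensors:
--                 chars += "S"
--             elif (col, row) in beacons:
--                 chars += "B"
--             elif (col,row) in not_beacons: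
--                 chars += "#"
--             else:
--                 chars += "."
--         out += chars + '\n'
--
--     return out
-- ===== SOURCE B (Python) =====
-- def draw_grid(not_beacons: list, sensors: dict):
--     """Scatter version: index every covered point in a dict once, then render
--     each cell with an O(1) lookup instead of three membership scans per cell."""
--     xs = [x for x, _ in not_beacons]
--     ys = [y for _, y in not_beacons]
--     min_x, max_x = min(xs), max(xs)
--     min_y, max_y = min(ys), max(ys)
--
--     grid = {}
--     for p in not_beacons:
--         grid[p] = "#"
--     for b in sensors.values():
--         grid[b] = "B"
--     for s in sensors:
--         grid[s] = "S"
--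
--     lines = []
--     for row in range(min_y, max_y + 1):
--         cells = "".join(grid.get((col, row), ".") for col in range(min_x, max_x + 1))
--         lines.append(str(row) + " " + cells + "\n")
--     return "".join(lines)
-- ===== Notes on version B (the rewrite author's own statement) =====
-- stated objective: faster
-- what changed: Instead of testing each grid cell against the sensors dict, beacon values and not_beacons list, B scatters all points into one point->char dict (# then B then S so overwrites give the S>B># priority) and renders each cell with a single O(1) lookup.
import Mathlib
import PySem

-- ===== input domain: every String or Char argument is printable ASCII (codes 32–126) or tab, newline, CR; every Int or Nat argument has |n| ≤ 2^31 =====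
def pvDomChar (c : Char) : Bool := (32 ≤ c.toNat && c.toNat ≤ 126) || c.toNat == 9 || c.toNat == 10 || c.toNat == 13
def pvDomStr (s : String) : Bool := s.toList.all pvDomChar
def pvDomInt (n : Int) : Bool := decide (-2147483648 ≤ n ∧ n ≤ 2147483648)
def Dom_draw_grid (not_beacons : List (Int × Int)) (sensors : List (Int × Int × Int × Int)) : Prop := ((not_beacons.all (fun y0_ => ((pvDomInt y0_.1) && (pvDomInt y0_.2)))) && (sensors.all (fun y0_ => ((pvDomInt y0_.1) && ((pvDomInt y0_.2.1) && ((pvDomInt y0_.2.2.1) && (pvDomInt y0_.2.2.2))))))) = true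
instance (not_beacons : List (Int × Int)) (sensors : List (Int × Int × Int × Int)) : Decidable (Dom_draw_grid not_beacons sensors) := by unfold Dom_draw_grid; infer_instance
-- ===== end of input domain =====

-- B replaces A's three per-cell membership scans by one point→char dict built once ('#', then 'B', then 'S'
-- so overwrites realise the S>B># priority) and an O(1) lookup per rendered cell (measurably faster).

-- ===== PORT A =====
-- shared marshalling of the Python dict argument (Lean assoc list → insertion-order dict, later keys overwrite)
def pvSensorDict (sensors : List (Int × Int × Int × Int)) : PySem.Dict (Int × Int) (Int × Int) :=
  PySem.Dict.ofList (sensors.map (fun q => ((q.1, q.2.1), (q.2.2.1, q.2.2.2))))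

def draw_grid (not_beacons : List (Int × Int)) (sensors : List (Int × Int × Int × Int)) : String :=
  let d := pvSensorDict sensors
  let beacons := d.values
  let xs : PySem.Set Int := PySem.Set.ofList (not_beacons.map (fun p => p.1))
  let ys : PySem.Set Int := PySem.Set.ofList (not_beacons.map (fun p => p.2))
  -- min(ys)/max(ys) raise ValueError on an empty list; Pre_ excludes that, the port totalises with .getD 0
  let minY : Int := (PySem.List.min? ys (fun v => v)).getD 0
  let maxY : Int := (PySem.List.max? ys (fun v => v)).getD 0
  let minX : Int := (PySem.List.min? xs (fun v => v)).getD 0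
  let maxX : Int := (PySem.List.max? xs (fun v => v)).getD 0
  (PySem.List.pyRange minY (maxY + 1) 1).foldl (fun out row =>
    let chars := PySem.Int.toStr row ++ " "            -- f"{row :<} " = str(row) + " "
    let chars := (PySem.List.pyRange minX (maxX + 1) 1).foldl (fun chars col =>
      if d.contains (col, row) then chars ++ "S"
      else if beacons.contains (col, row) then chars ++ "B"
      else if not_beacons.contains (col, row) then chars ++ "#"
      else chars ++ ".") chars
    out ++ chars ++ "\n") ""

-- ===== PORT B =====
def draw_grid_alt (not_beacons : List (Int × Int)) (sensors : List (Int × Int × Int × Int)) : String :=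
  let d := pvSensorDict sensors
  let xs := not_beacons.map (fun p => p.1)
  let ys := not_beacons.map (fun p => p.2)
  let minX : Int := (PySem.List.min? xs (fun v => v)).getD 0   -- min raises on []; Pre_ excludes, .getD 0 totalises
  let maxX : Int := (PySem.List.max? xs (fun v => v)).getD 0
  let minY : Int := (PySem.List.min? ys (fun v => v)).getD 0
  let maxY : Int := (PySem.List.max? ys (fun v => v)).getD 0
  let grid : PySem.Dict (Int × Int) String :=
    not_beacons.foldl (fun g p => g.insert p "#") PySem.Dict.empty
  let grid := d.values.foldl (fun g b => g.insert b "B") grid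
  let grid := d.keys.foldl (fun g s => g.insert s "S") grid
  let lines : List String := (PySem.List.pyRange minY (maxY + 1) 1).foldl (fun ls row =>
    let cells := PySem.Str.join "" ((PySem.List.pyRange minX (maxX + 1) 1).map
      (fun col => grid.getD (col, row) "."))
    ls ++ [PySem.Int.toStr row ++ " " ++ cells ++ "\n"]) []
  PySem.Str.join "" lines

-- ===== PRECONDITION & SPEC =====
-- Pre_ excludes only the empty not_beacons list, on which Python's min(...) raises ValueError (in A and in B).
def Pre_draw_grid (not_beacons : List (Int × Int)) (sensors : List (Int × Int × Int × Int)) : Prop :=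
  not_beacons ≠ []
instance (not_beacons : List (Int × Int)) (sensors : List (Int × Int × Int × Int)) : Decidable (Pre_draw_grid not_beacons sensors) := by unfold Pre_draw_grid; infer_instance
def pvWitness_draw_grid : (List (Int × Int)) × (List (Int × Int × Int × Int)) :=
  ([(0, 0), (2, 1)], [(1, 1, 2, 0)])
def Spec_draw_grid (not_beacons : List (Int × Int)) (sensors : List (Int × Int × Int × Int)) (out : String) : Prop := out = draw_grid_alt not_beacons sensors
instance (not_beacons : List (Int × Int)) (sensors : List (Int × Int × Int × Int)) (out : String) : Decidable (Spec_draw_grid not_beacons sensors out) := by unfold Spec_draw_grid; infer_instance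

-- ===== CLAIM (what is proved, stated in full; the proofs are below) =====
def Claim_equal_draw_grid : Prop := ∀ (not_beacons : List (Int × Int)) (sensors : List (Int × Int × Int × Int)), Dom_draw_grid not_beacons sensors → Pre_draw_grid not_beacons sensors → Spec_draw_grid not_beacons sensors (draw_grid not_beacons sensors)

-- ===== LEMMAS AND PROOFS =====

-- min/max over a list depend only on its members (Int, identity key)
theorem pv_min?_congr (l₁ l₂ : List Int) (h : ∀ v, v ∈ l₁ ↔ v ∈ l₂) :
    PySem.List.min? l₁ (fun v => v) = PySem.List.min? l₂ (fun v => v) := by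
  cases h₁ : PySem.List.min? l₁ (fun v => v) with
  | none =>
      have he : l₁ = [] := (PySem.List.min?_eq_none_iff _ _).1 h₁
      have he₂ : l₂ = [] := by
        cases h₂ : l₂ with
        | nil => rfl
        | cons a t => exact absurd ((h a).2 (by simp [h₂])) (by simp [he])
      rw [he₂]
      exact ((PySem.List.min?_eq_none_iff _ _).2 rfl).symm
  | some m =>
      have hm₁ : m ∈ l₁ := PySem.List.min?_mem h₁
      have hm₂ : m ∈ l₂ := (h m).1 hm₁
      cases h₂ : PySem.List.min? l₂ (fun v => v) with
      | none =>
          have : l₂ = [] := (PySem.List.min?_eq_none_iff _ _).1 h₂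
          simp [this] at hm₂
      | some m' =>
          have hm'₂ : m' ∈ l₂ := PySem.List.min?_mem h₂
          have h1 : m ≤ m' := PySem.List.min?_isMin h₁ m' ((h m').2 hm'₂)
          have h2 : m' ≤ m := PySem.List.min?_isMin h₂ m hm₂
          simp only [] at h1 h2
          rw [le_antisymm h1 h2]

theorem pv_max?_congr (l₁ l₂ : List Int) (h : ∀ v, v ∈ l₁ ↔ v ∈ l₂) :
    PySem.List.max? l₁ (fun v => v) = PySem.List.max? l₂ (fun v => v) := by
  cases h₁ : PySem.List.max? l₁ (fun v => v) with
  | none =>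
      have he : l₁ = [] := (PySem.List.max?_eq_none_iff _ _).1 h₁
      have he₂ : l₂ = [] := by
        cases h₂ : l₂ with
        | nil => rfl
        | cons a t => exact absurd ((h a).2 (by simp [h₂])) (by simp [he])
      rw [he₂]
      exact ((PySem.List.max?_eq_none_iff _ _).2 rfl).symm
  | some m =>
      have hm₁ : m ∈ l₁ := PySem.List.max?_mem h₁
      have hm₂ : m ∈ l₂ := (h m).1 hm₁
      cases h₂ : PySem.List.max? l₂ (fun v => v) with
      | none =>
          have : l₂ = [] := (PySem.List.max?_eq_none_iff _ _).1 h₂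
          simp [this] at hm₂
      | some m' =>
          have hm'₂ : m' ∈ l₂ := PySem.List.max?_mem h₂
          have h1 : m' ≤ m := PySem.List.max?_isMax h₁ m' ((h m').2 hm'₂)
          have h2 : m ≤ m' := PySem.List.max?_isMax h₂ m hm₂
          simp only [] at h1 h2
          rw [le_antisymm h2 h1]

-- scatter pass: writing the SAME char at every point of l, the final lookup is "∈ l" or the old value
theorem pv_getD_scatter (l : List (Int × Int)) (c dflt : String)
    (g : PySem.Dict (Int × Int) String) (q : Int × Int) :
    (l.foldl (fun g p => g.insert p c) g).getD q dflt
      = if q ∈ l then c else g.getD q dflt := by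
  induction l generalizing g with
  | nil => simp
  | cons p t ih =>
      simp only [List.foldl_cons, ih, PySem.Dict.getD_insert, List.mem_cons]
      by_cases hq : q ∈ t <;> by_cases hp : q = p <;> simp [hq, hp]

-- a fold appending 'f x ++ t' to a string, seen on the character list
theorem pv_foldl_strAppend2_toList (l : List Int) (f : Int → String) (t s : String) :
    (l.foldl (fun acc x => acc ++ f x ++ t) s).toList
      = s.toList ++ l.flatMap (fun x => (f x).toList ++ t.toList) := by
  induction l generalizing s with
  | nil => simp
  | cons a r ih => simp [ih]

theorem pv_foldl_strAppend_toList (l : List Int) (f : Int → String) (s : String) :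
    (l.foldl (fun acc x => acc ++ f x) s).toList
      = s.toList ++ l.flatMap (fun x => (f x).toList) := by
  induction l generalizing s with
  | nil => simp
  | cons a r ih => simp [ih]

theorem pv_intercalate_nil_sep (l : List (List Char)) : ([] : List Char).intercalate l = l.flatten := by
  induction l with
  | nil => rfl
  | cons a t ih => cases t <;> simp_all [List.intercalate, List.intersperse]

theorem pv_join_empty_toList (ps : List String) :
    (PySem.Str.join "" ps).toList = (ps.map String.toList).flatten := by
  simp [PySem.Str.toList_join, PySem.Chars.join, pv_intercalate_nil_sep]

theorem pv_flatten_map (l : List Int) (f : Int → List Char) :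
    (l.map f).flatten = l.flatMap f := by
  induction l <;> simp_all

-- the three scatter passes realise A's if-chain (S over B over #)
theorem pv_cell_eq (nb : List (Int × Int)) (d : PySem.Dict (Int × Int) (Int × Int)) (q : Int × Int) :
    (d.keys.foldl (fun g s => g.insert s "S")
       (d.values.foldl (fun g b => g.insert b "B")
         (nb.foldl (fun g p => g.insert p "#") PySem.Dict.empty))).getD q "."
    = (if d.contains q then "S"
       else if d.values.contains q then "B"
       else if nb.contains q then "#" else ".") := by
  rw [pv_getD_scatter, pv_getD_scatter, pv_getD_scatter]
  by_cases h1 : q ∈ d.keys <;> by_cases h2 : q ∈ d.values <;> by_cases h3 : q ∈ nb <;>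
    simp [h1, h2, h3, PySem.Dict.contains_iff_mem_keys]
-- ===== VERDICT (by name: the statement is the Claim_ definition above) =====
theorem draw_grid_spec : Claim_equal_draw_grid := by
  intro nb sensors _ _
  unfold Spec_draw_grid draw_grid draw_grid_alt
  simp only []
  -- the min/max taken over the deduplicated sets (A) equal those over the raw lists (B)
  have hminx := pv_min?_congr (PySem.Set.ofList (nb.map (fun p => p.1))) (nb.map (fun p => p.1))
      (fun v => PySem.Set.mem_ofList _ _)
  have hmaxx := pv_max?_congr (PySem.Set.ofList (nb.map (fun p => p.1))) (nb.map (fun p => p.1))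
      (fun v => PySem.Set.mem_ofList _ _)
  have hminy := pv_min?_congr (PySem.Set.ofList (nb.map (fun p => p.2))) (nb.map (fun p => p.2))
      (fun v => PySem.Set.mem_ofList _ _)
  have hmaxy := pv_max?_congr (PySem.Set.ofList (nb.map (fun p => p.2))) (nb.map (fun p => p.2))
      (fun v => PySem.Set.mem_ofList _ _)
  rw [hminx, hmaxx, hminy, hmaxy]
  set d := pvSensorDict sensors with hd
  set minX : Int := (PySem.List.min? (nb.map (fun p => p.1)) (fun v => v)).getD 0
  set maxX : Int := (PySem.List.max? (nb.map (fun p => p.1)) (fun v => v)).getD 0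
  set minY : Int := (PySem.List.min? (nb.map (fun p => p.2)) (fun v => v)).getD 0
  set maxY : Int := (PySem.List.max? (nb.map (fun p => p.2)) (fun v => v)).getD 0
  apply String.toList_inj.mp
  -- A's inner loop step, rewritten as 'append one cell string'
  have hstep : ∀ row : Int,
      (fun (chars : String) (col : Int) =>
        if d.contains (col, row) then chars ++ "S"
        else if (d.values).contains (col, row) then chars ++ "B"
        else if nb.contains (col, row) then chars ++ "#"
        else chars ++ ".")
      = (fun (chars : String) (col : Int) => chars ++
          (if d.contains (col, row) then "S"
           else if (d.values).contains (col, row) then "B"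
           else if nb.contains (col, row) then "#" else ".")) := by
    intro row; funext chars col; split_ifs <;> rfl
  -- B's lines loop is a map
  rw [PySem.List.foldl_append_singleton_eq_map]
  rw [pv_foldl_strAppend2_toList (f := fun row =>
        (PySem.List.pyRange minX (maxX + 1) 1).foldl (fun chars col =>
          if d.contains (col, row) then chars ++ "S"
          else if (d.values).contains (col, row) then chars ++ "B"
          else if nb.contains (col, row) then chars ++ "#"
          else chars ++ ".") (PySem.Int.toStr row ++ " "))]
  rw [pv_join_empty_toList]
  simp only [List.nil_append, List.map_map]
  have hnil : ("".toList : List Char) = [] := rfl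
  rw [pv_flatten_map, hnil, List.nil_append]
  congr 1
  funext row
  rw [hstep row, pv_foldl_strAppend_toList]
  simp only [Function.comp_def]
  simp only [String.toList_append, pv_join_empty_toList, List.map_map, Function.comp_def,
    pv_cell_eq, pv_flatten_map, List.append_assoc]
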